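-- pv_equiv track=rewrite | github.com/JRicardo22/Algortimos-de-Agrupamiento | Programas/programa2.py | parsear_columna_usuario
-- ===== SOURCE A (Python) =====
-- def to_lower(s):
--     try:
--         return s.lower()
--     except Exception:
--         return s
--
-- def parsear_columna_usuario(txt, encabezado):
--     if not txt:
--         return None
--     es_entero = True
--     for ch in txt:
--         if ch < "0" or ch > "9":
--             es_entero = False
--             break
--     if es_entero:
--         try:
--             idx = int(txt)
--             if 1 <= idx <= len(encabezado):
--                 return idx - 1
--         except Exception:
--             return None
--     # nombre exacto
--     for i, nm in enumerate(encabezado):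
--         if nm == txt:
--             return i
--     # nombre insensible a mayúsculas
--     low = to_lower(txt)
--     for i, nm in enumerate(encabezado):
--         if to_lower(nm) == low:
--             return i
--     return None
-- ===== SOURCE B (Python) =====
-- def parsear_columna_usuario(txt, encabezado):
--     if not txt:
--         return None
--     if all("0" <= ch <= "9" for ch in txt):
--         idx = int(txt)
--         if 1 <= idx <= len(encabezado):
--             return idx - 1
--     low = txt.lower()
--     exact = None
--     ci = None
--     for i, nm in enumerate(encabezado):
--         if exact is None and nm == txt:
--             exact = i
--         if ci is None and nm.lower() == low:
--             ci = i
--     return exact if exact is not None else ci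
-- ===== Notes on version B (the rewrite author's own statement) =====
-- stated objective: alternative
-- what changed: Replaces A's two sequential scans of the header (exact-match pass, then case-insensitive pass) with a single loop that tracks the first exact and first case-insensitive match simultaneously and resolves the priority after the loop.
import Mathlib
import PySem

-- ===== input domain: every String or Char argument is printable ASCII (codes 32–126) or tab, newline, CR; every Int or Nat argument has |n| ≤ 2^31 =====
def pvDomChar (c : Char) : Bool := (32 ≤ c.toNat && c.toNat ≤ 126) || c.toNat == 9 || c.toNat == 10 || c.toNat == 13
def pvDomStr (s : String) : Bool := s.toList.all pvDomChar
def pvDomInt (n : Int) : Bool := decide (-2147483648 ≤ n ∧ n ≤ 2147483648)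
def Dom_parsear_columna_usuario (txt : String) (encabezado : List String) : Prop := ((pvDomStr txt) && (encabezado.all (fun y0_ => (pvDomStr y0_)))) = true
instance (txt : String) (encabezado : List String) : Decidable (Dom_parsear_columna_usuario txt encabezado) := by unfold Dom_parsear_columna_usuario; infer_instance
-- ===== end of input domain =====

-- B merges A's two sequential scans of the header into one loop tracking first exact and
-- first case-insensitive match simultaneously (objective: alternative decomposition, same cost).

-- ===== PORT A =====
-- first loop: 'for i, nm in enumerate(encabezado): if nm == txt: return i'
def pvExactScan (txt : String) : List String → Nat → Option Int
  | [], _ => none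
  | nm :: rest, i => if nm = txt then some (i : Int) else pvExactScan txt rest (i + 1)

-- second loop: 'for i, nm in enumerate(encabezado): if to_lower(nm) == low: return i'
def pvCiScan (low : String) : List String → Nat → Option Int
  | [], _ => none
  | nm :: rest, i => if PySem.Str.lower nm = low then some (i : Int) else pvCiScan low rest (i + 1)

def parsear_columna_usuario (txt : String) (encabezado : List String) : Option Int :=
  if txt = "" then none
  else
    -- 'for ch in txt: if ch < "0" or ch > "9": es_entero = False; break'
    let es_entero := txt.toList.all (fun ch => '0' ≤ ch && ch ≤ '9')
    -- digit block: 'some r' means an early return with r, 'none' means fall through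
    let digitRes : Option (Option Int) :=
      if es_entero then
        match PySem.Int.ofStr? txt with
        | none => some none                     -- 'except Exception: return None'
        | some idx =>
            if 1 ≤ idx ∧ idx ≤ (encabezado.length : Int) then some (some (idx - 1))
            else none
      else none
    match digitRes with
    | some r => r
    | none =>
      match pvExactScan txt encabezado 0 with
      | some i => some i
      | none => pvCiScan (PySem.Str.lower txt) encabezado 0

-- ===== PORT B =====
-- the single loop of Source B: state (exact, ci), each updated only while still None
def pvOnePass (txt low : String) : List String → Nat → Option Int × Option Int → Option Int × Option Int
  | [], _, st => st
  | nm :: rest, i, st =>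
      let st1 := if st.1 = none ∧ nm = txt then (some (i : Int), st.2) else st
      let st2 := if st1.2 = none ∧ PySem.Str.lower nm = low then (st1.1, some (i : Int)) else st1
      pvOnePass txt low rest (i + 1) st2

def parsear_columna_usuario_alt (txt : String) (encabezado : List String) : Option Int :=
  if txt = "" then none
  else if txt.toList.all (fun ch => '0' ≤ ch && ch ≤ '9') then
    match PySem.Int.ofStr? txt with
    | some idx =>
        if 1 ≤ idx ∧ idx ≤ (encabezado.length : Int) then some (idx - 1)
        else
          let st := pvOnePass txt (PySem.Str.lower txt) encabezado 0 (none, none)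
          match st.1 with
          | some i => some i
          | none => st.2
    | none => none    -- unreachable: int() succeeds on a nonempty all-digit string
  else
    let st := pvOnePass txt (PySem.Str.lower txt) encabezado 0 (none, none)
    match st.1 with
    | some i => some i
    | none => st.2

-- ===== PRECONDITION & SPEC =====
def Spec_parsear_columna_usuario (txt : String) (encabezado : List String) (out : Option Int) : Prop := out = parsear_columna_usuario_alt txt encabezado
instance (txt : String) (encabezado : List String) (out : Option Int) : Decidable (Spec_parsear_columna_usuario txt encabezado out) := by unfold Spec_parsear_columna_usuario; infer_instance

-- ===== CLAIM (what is proved, stated in full; the proofs are below) =====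
def Claim_equal_parsear_columna_usuario : Prop := ∀ (txt : String) (encabezado : List String), Dom_parsear_columna_usuario txt encabezado → Spec_parsear_columna_usuario txt encabezado (parsear_columna_usuario txt encabezado)

-- ===== LEMMAS AND PROOFS =====

-- the one-pass fold computes exactly (first exact hit, first case-insensitive hit),
-- each shielded by a pre-existing accumulator value
theorem pvOnePass_eq (txt low : String) (l : List String) (i : Nat) (e c : Option Int) :
    pvOnePass txt low l i (e, c) =
      ((match e with | some x => some x | none => pvExactScan txt l i),
       (match c with | some x => some x | none => pvCiScan low l i)) := by
  induction l generalizing i e c with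
  | nil => cases e <;> cases c <;> simp [pvOnePass, pvExactScan, pvCiScan]
  | cons nm rest ih =>
      simp only [pvOnePass, pvExactScan, pvCiScan]
      cases e with
      | some x =>
          cases c with
          | some y => simp [ih]
          | none =>
              by_cases hc : PySem.Str.lower nm = low <;> simp [hc, ih]
      | none =>
          cases c with
          | some y => by_cases he : nm = txt <;> simp [he, ih]
          | none =>
              by_cases he : nm = txt
              · subst he
                by_cases hc : PySem.Str.lower nm = low <;> simp [hc, ih]
              · by_cases hc : PySem.Str.lower nm = low <;> simp [he, hc, ih]

theorem pvMerge (txt : String) (l : List String) :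
    (match (pvOnePass txt (PySem.Str.lower txt) l 0 (none, none)).1 with
      | some i => some i
      | none => (pvOnePass txt (PySem.Str.lower txt) l 0 (none, none)).2) =
      (match pvExactScan txt l 0 with
        | some i => some i
        | none => pvCiScan (PySem.Str.lower txt) l 0) := by
  rw [pvOnePass_eq]

-- ===== VERDICT (by name: the statement is the Claim_ definition above) =====
theorem parsear_columna_usuario_spec : Claim_equal_parsear_columna_usuario := by
  intro txt encabezado _
  unfold Spec_parsear_columna_usuario parsear_columna_usuario parsear_columna_usuario_alt
  by_cases h0 : txt = ""
  · simp [h0]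
  · simp only [h0, if_false]
    by_cases hd : txt.toList.all (fun ch => '0' ≤ ch && ch ≤ '9')
    · simp only [hd, if_true]
      cases hp : PySem.Int.ofStr? txt with
      | none => simp
      | some idx =>
          by_cases hr : 1 ≤ idx ∧ idx ≤ (encabezado.length : Int)
          · simp [hr]
          · simpa [hr] using (pvMerge txt encabezado).symm
    · simpa [hd] using (pvMerge txt encabezado).symm
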